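-- pv_equiv track=rewrite | github.com/Kaix76/anima-verse | app/skills/talk_to_skill.py | _resolve_name
-- ===== SOURCE A (Python) =====
-- def _resolve_name(raw: str, available: list) -> str:
--     """Case-insensitive + fuzzy Name-Aufloesung."""
--     raw_lower = raw.lower()
--     for name in available:
--         if name.lower() == raw_lower:
--             return name
--     for name in available:
--         if raw_lower in name.lower() or name.lower() in raw_lower:
--             return name
--     return ""
-- ===== SOURCE B (Python) =====
-- def _resolve_name(raw: str, available: list) -> str:
--     """Single pass: return eagerly on exact match, latch the first fuzzy candidate."""
--     raw_lower = raw.lower()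
--     fuzzy = None
--     for name in available:
--         nl = name.lower()
--         if nl == raw_lower:
--             return name
--         if fuzzy is None and (raw_lower in nl or nl in raw_lower):
--             fuzzy = name
--     return fuzzy if fuzzy is not None else ""
-- ===== Notes on version B (the rewrite author's own statement) =====
-- stated objective: alternative
-- what changed: Replaces A's two full scans (exact pass, then fuzzy pass) by one single pass that returns eagerly on an exact match and latches only the first fuzzy candidate as a fallback.
import Mathlib
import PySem

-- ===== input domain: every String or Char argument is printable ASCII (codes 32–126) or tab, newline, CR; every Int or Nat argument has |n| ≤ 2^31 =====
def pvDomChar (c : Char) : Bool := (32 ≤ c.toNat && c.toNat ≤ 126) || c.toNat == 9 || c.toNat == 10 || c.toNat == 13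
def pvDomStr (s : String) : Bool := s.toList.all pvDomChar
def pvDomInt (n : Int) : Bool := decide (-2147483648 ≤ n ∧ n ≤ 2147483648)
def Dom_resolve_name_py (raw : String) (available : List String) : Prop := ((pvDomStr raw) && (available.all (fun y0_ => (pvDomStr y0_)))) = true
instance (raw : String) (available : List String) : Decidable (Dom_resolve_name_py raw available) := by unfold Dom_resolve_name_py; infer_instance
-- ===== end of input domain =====

-- B replaces A's two full scans by one single pass with an eager exact return and a
-- latched first fuzzy fallback (alternative decomposition, same cost).

-- ===== PORT A =====
-- first loop of A: first name whose lowercase equals raw_lower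
def pvALoop1 (rl : String) : List String → Option String
  | [] => none
  | n :: rest => if PySem.Str.lower n == rl then some n else pvALoop1 rl rest

-- second loop of A: first fuzzy (substring either way) match
def pvALoop2 (rl : String) : List String → Option String
  | [] => none
  | n :: rest =>
      if PySem.Str.isIn rl (PySem.Str.lower n) || PySem.Str.isIn (PySem.Str.lower n) rl
      then some n else pvALoop2 rl rest

def resolve_name_py (raw : String) (available : List String) : String :=
  let raw_lower := PySem.Str.lower raw
  match pvALoop1 raw_lower available with
  | some n => n
  | none =>
    match pvALoop2 raw_lower available with
    | some n => n
    | none => ""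

-- ===== PORT B =====
-- single pass: return on exact match, keep the first fuzzy candidate in `fuzzy`
def pvBLoop (rl : String) (fuzzy : Option String) : List String → String
  | [] => fuzzy.getD ""
  | n :: rest =>
      let nl := PySem.Str.lower n
      if nl == rl then n
      else
        pvBLoop rl
          (if fuzzy.isNone && (PySem.Str.isIn rl nl || PySem.Str.isIn nl rl) then some n else fuzzy)
          rest

def resolve_name_py_alt (raw : String) (available : List String) : String :=
  pvBLoop (PySem.Str.lower raw) none available

-- ===== PRECONDITION & SPEC =====
def Spec_resolve_name_py (raw : String) (available : List String) (out : String) : Prop := out = resolve_name_py_alt raw available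
instance (raw : String) (available : List String) (out : String) : Decidable (Spec_resolve_name_py raw available out) := by unfold Spec_resolve_name_py; infer_instance

-- ===== CLAIM (what is proved, stated in full; the proofs are below) =====
def Claim_equal_resolve_name_py : Prop := ∀ (raw : String) (available : List String), Dom_resolve_name_py raw available → Spec_resolve_name_py raw available (resolve_name_py raw available)

-- ===== LEMMAS AND PROOFS =====

-- invariant of B's single pass, relating it to A's two loops and the latched fallback
theorem pvBLoop_eq (rl : String) (l : List String) : ∀ (fuzzy : Option String),
    pvBLoop rl fuzzy l =
      match pvALoop1 rl l with
      | some n => n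
      | none =>
        match fuzzy with
        | some f => f
        | none => (pvALoop2 rl l).getD "" := by
  induction l with
  | nil => intro fuzzy; cases fuzzy <;> simp [pvBLoop, pvALoop1, pvALoop2]
  | cons n rest ih =>
    intro fuzzy
    by_cases hx : PySem.Str.lower n == rl
    · simp [pvBLoop, pvALoop1, hx]
    · cases fuzzy with
      | some f =>
        simp only [pvBLoop, pvALoop1, hx, if_neg, Bool.false_eq_true, not_false_iff,
          Option.isNone_some, Bool.false_and]
        rw [ih]
      | none =>
        by_cases hc : (PySem.Str.isIn rl (PySem.Str.lower n) || PySem.Str.isIn (PySem.Str.lower n) rl) = true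
        · simp only [pvBLoop, pvALoop1, pvALoop2, hx, hc, Option.isNone_none, Bool.true_and,
            if_true, if_false, Bool.false_eq_true]
          rw [ih]
          simp
        · simp only [pvBLoop, pvALoop1, pvALoop2, hx, hc, Option.isNone_none, Bool.true_and,
            if_false, Bool.false_eq_true]
          rw [ih]

-- ===== VERDICT (by name: the statement is the Claim_ definition above) =====
theorem resolve_name_py_spec : Claim_equal_resolve_name_py := by
  intro raw available _
  unfold Spec_resolve_name_py resolve_name_py resolve_name_py_alt
  rw [pvBLoop_eq]
  cases h1 : pvALoop1 (PySem.Str.lower raw) available <;>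
    cases h2 : pvALoop2 (PySem.Str.lower raw) available <;> simp [h1, h2]
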